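-- pv_equiv track=rewrite | github.com/hijodelsigloxxi/Ejercicios_bases_programacion | Bases de la programación II/codigo/ejercicio9_solo1.py | solo_1
-- ===== SOURCE A (Python) =====
-- def solo_1(m):
--     variables_filas = {}
--     variables_columnas = {}
--     for i in range(len(m)):
--         nombre_variable = f'variable_fila {i}'
--         variables_filas[nombre_variable] = 0
--     for i in range(len(m[0])):
--         nombre_variable = f'variable_columna {i}'
--         variables_columnas[nombre_variable] = 0
--     num = -1
--     for i in variables_filas:
--         num = num + 1
--         for j in range(len(m[0])):
--             variables_filas[i] = variables_filas[i] + m[num][j]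
--     num = -1
--     for i in variables_columnas:
--         num = num + 1
--         for j in range(len(m)):
--             variables_columnas[i] = variables_columnas[i] + m[j][num]
--     for i in  variables_filas.values():
--         if i != 1:
--             return False
--     for i in  variables_columnas.values():
--         if i != 1:
--             return False
--     return True
-- ===== SOURCE B (Python) =====
-- def solo_1(m):
--     c = len(m[0])
--     cols = [0] * c
--     for row in m:
--         if sum(row[:c]) != 1:
--             return False
--         cols = [a + b for a, b in zip(cols, row)]
--     return all(v == 1 for v in cols)
-- ===== Notes on version B (the rewrite author's own statement) =====
-- stated objective: simpler
-- what changed: B traverses the matrix once row-by-row treating rows as whole values: it checks each row's sum immediately with early exit while folding a column-sum vector by element-wise zip addition, then checks that vector - instead of A's four staged index-driven passes building and rescanning two string-keyed dicts.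
import Mathlib
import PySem

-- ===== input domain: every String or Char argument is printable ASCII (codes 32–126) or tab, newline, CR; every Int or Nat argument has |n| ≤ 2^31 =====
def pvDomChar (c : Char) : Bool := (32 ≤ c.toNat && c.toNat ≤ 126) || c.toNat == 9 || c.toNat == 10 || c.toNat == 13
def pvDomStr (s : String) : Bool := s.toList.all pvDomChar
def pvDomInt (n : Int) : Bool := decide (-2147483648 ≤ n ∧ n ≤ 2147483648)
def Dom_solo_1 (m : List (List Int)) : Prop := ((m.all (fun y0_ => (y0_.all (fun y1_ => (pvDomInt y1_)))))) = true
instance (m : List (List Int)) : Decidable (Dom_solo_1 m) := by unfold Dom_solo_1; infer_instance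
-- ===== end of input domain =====

-- B replaces A's four staged index-driven passes over string-keyed dicts by a single row-wise
-- traversal: each row's sum is checked with early exit while a column-sum vector is folded by
-- element-wise zip addition; objective: simpler.

-- ===== PORT A =====
-- m[i][j]: under Pre_solo_1 both indices are in range, so the `getD` defaults are never used.
def pvGet2 (m : List (List Int)) (i j : Int) : Int :=
  PySem.List.pyGetD ((PySem.List.pyGet? m i).getD []) j 0

def solo_1 (m : List (List Int)) : Bool :=
  let filas0 : PySem.Dict String Int :=
    (PySem.List.pyRange 0 (m.length : Int) 1).foldl
      (fun d i => d.insert ("variable_fila " ++ PySem.Int.toStr i) 0) PySem.Dict.empty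
  let colLen : Int := (((PySem.List.pyGet? m 0).getD []).length : Int)
  let cols0 : PySem.Dict String Int :=
    (PySem.List.pyRange 0 colLen 1).foldl
      (fun d i => d.insert ("variable_columna " ++ PySem.Int.toStr i) 0) PySem.Dict.empty
  let filas1 : Int × PySem.Dict String Int :=
    filas0.keys.foldl
      (fun s k => (s.1 + 1,
        (PySem.List.pyRange 0 colLen 1).foldl
          (fun d j => d.insert k (d.getD k 0 + pvGet2 m (s.1 + 1) j)) s.2))
      (-1, filas0)
  let cols1 : Int × PySem.Dict String Int :=
    cols0.keys.foldl
      (fun s k => (s.1 + 1,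
        (PySem.List.pyRange 0 (m.length : Int) 1).foldl
          (fun d j => d.insert k (d.getD k 0 + pvGet2 m j (s.1 + 1))) s.2))
      (-1, cols0)
  if filas1.2.values.any (fun v => v != 1) then false
  else if cols1.2.values.any (fun v => v != 1) then false
  else true

-- ===== PORT B =====
-- the for-loop with an early `return False`, as structural recursion over the rows;
-- `row[:c]` is PySem.List.slice, the zip-comprehension is List.zipWith (+)
def pvGoB (c : Nat) : List (List Int) → List Int → Bool
  | [], cols => cols.all (fun v => v == 1)
  | row :: rest, cols =>
      if (PySem.List.slice row none (some (c : Int))).sum != 1 then false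
      else pvGoB c rest (List.zipWith (· + ·) cols row)

def solo_1_alt (m : List (List Int)) : Bool :=
  let c : Nat := ((PySem.List.pyGet? m 0).getD []).length
  pvGoB c m (List.replicate c 0)

-- ===== PRECONDITION & SPEC =====
-- Pre_ excludes exactly the inputs on which the Python A raises IndexError (empty matrix: m[0];
-- a row shorter than the first row: m[i][j] with j < len(m[0])).
def Pre_solo_1 (m : List (List Int)) : Prop :=
  m ≠ [] ∧ ∀ r ∈ m, ((PySem.List.pyGet? m 0).getD []).length ≤ r.length
instance (m : List (List Int)) : Decidable (Pre_solo_1 m) := by unfold Pre_solo_1; infer_instance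
def pvWitness_solo_1 : List (List Int) := [[1, 0], [0, 1]]

def Spec_solo_1 (m : List (List Int)) (out : Bool) : Prop := out = solo_1_alt m
instance (m : List (List Int)) (out : Bool) : Decidable (Spec_solo_1 m out) := by unfold Spec_solo_1; infer_instance

-- ===== CLAIM (what is proved, stated in full; the proofs are below) =====
def Claim_equal_solo_1 : Prop := ∀ (m : List (List Int)), Dom_solo_1 m → Pre_solo_1 m → Spec_solo_1 m (solo_1 m)

-- ===== LEMMAS AND PROOFS =====

-- ---- decimal-representation injectivity (no such lemma exists in Mathlib/PySem) ----
def pvRep (n : Nat) : List Char :=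
  if n / 10 = 0 then [Nat.digitChar (n % 10)] else pvRep (n / 10) ++ [Nat.digitChar (n % 10)]
termination_by n
decreasing_by omega

def pvVal (cs : List Char) : Nat := cs.foldl (fun a c => 10 * a + (c.toNat - 48)) 0

theorem pvDigitChar_val : ∀ d : Nat, d < 10 → (Nat.digitChar d).toNat - 48 = d := by decide

theorem pvVal_rep (n : Nat) : pvVal (pvRep n) = n := by
  induction n using pvRep.induct with
  | case1 n h =>
    rw [pvRep, if_pos h]
    have h10 : n % 10 < 10 := Nat.mod_lt _ (by omega)
    simp [pvVal, pvDigitChar_val _ h10]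
    omega
  | case2 n h ih =>
    rw [pvRep, if_neg h]
    have h10 : n % 10 < 10 := Nat.mod_lt _ (by omega)
    have : pvVal (pvRep (n / 10) ++ [Nat.digitChar (n % 10)])
        = 10 * pvVal (pvRep (n / 10)) + ((Nat.digitChar (n % 10)).toNat - 48) := by
      simp [pvVal, List.foldl_append]
    rw [this, ih, pvDigitChar_val _ h10]
    omega

theorem pvToDigitsCore_rep : ∀ (fuel n : Nat), n < fuel → ∀ ds,
    Nat.toDigitsCore 10 fuel n ds = pvRep n ++ ds := by
  intro fuel
  induction fuel with
  | zero => omega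
  | succ f ih =>
    intro n hn ds
    show Nat.toDigitsCore 10 (f + 1) n ds = pvRep n ++ ds
    rw [Nat.toDigitsCore]
    by_cases h : n / 10 = 0
    · rw [if_pos h]
      conv_rhs => rw [pvRep]
      rw [if_pos h]
      simp
    · rw [if_neg h]
      have hlt : n / 10 < f := by omega
      rw [ih _ hlt]
      conv_rhs => rw [pvRep]
      rw [if_neg h]
      simp

theorem pvToDigits_inj {a b : Nat} (h : Nat.toDigits 10 a = Nat.toDigits 10 b) : a = b := by
  rw [Nat.toDigits, Nat.toDigits, pvToDigitsCore_rep _ _ (by omega), pvToDigitsCore_rep _ _ (by omega)] at h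
  simp only [List.append_nil] at h
  have := congrArg pvVal h
  rwa [pvVal_rep, pvVal_rep] at this

theorem pvKey_inj (p : String) {a b : Int} (ha : 0 ≤ a) (hb : 0 ≤ b)
    (h : p ++ PySem.Int.toStr a = p ++ PySem.Int.toStr b) : a = b := by
  have h1 := congrArg String.toList h
  rw [String.toList_append, String.toList_append] at h1
  have h2 := List.append_cancel_left h1
  rw [PySem.Int.toList_toStr, PySem.Int.toList_toStr] at h2
  unfold PySem.Int.toChars at h2
  rw [if_neg (by omega), if_neg (by omega)] at h2
  have := pvToDigits_inj h2
  omega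

-- ---- dict loop characterisation (A side) ----
theorem pvDict_insert_getD_self {κ : Type} [BEq κ] [LawfulBEq κ]
    (d : PySem.Dict κ Int) (k : κ) (hnd : d.keys.Nodup) (hc : d.contains k = true) :
    d.insert k (d.getD k 0) = d := by
  apply PySem.Dict.ext
  rw [PySem.Dict.items_insert_of_contains d _ hc]
  have hk : k ∈ d.keys := (PySem.Dict.contains_iff_mem_keys d k).1 hc
  have : ∀ q ∈ d.items, (if (q.1 == k) = true then (k, d.getD k 0) else q) = q := by
    intro q hq
    obtain ⟨q1, q2⟩ := q
    by_cases hqk : q1 = k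
    · cases hqk
      rw [PySem.Dict.getD_of_mem_items d hq hnd 0]
      simp
    · simp [hqk]
  rw [List.map_congr_left this]
  simp

theorem pvDict_foldl_insert_add {κ : Type} [BEq κ] [LawfulBEq κ]
    (js : List Int) (g : Int → Int) (k : κ) :
    ∀ (d : PySem.Dict κ Int) (v : Int),
      js.foldl (fun d j => d.insert k (d.getD k 0 + g j)) (d.insert k v)
        = d.insert k (v + (js.map g).sum) := by
  induction js with
  | nil => intro d v; simp
  | cons j t ih =>
    intro d v
    simp only [List.foldl_cons, PySem.Dict.getD_insert_self, PySem.Dict.insert_insert_self]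
    rw [ih d (v + g j)]
    simp [add_assoc]

theorem pvDict_inner {κ : Type} [BEq κ] [LawfulBEq κ]
    (js : List Int) (g : Int → Int) (k : κ) (d : PySem.Dict κ Int)
    (hnd : d.keys.Nodup) (hc : d.contains k = true) :
    js.foldl (fun d j => d.insert k (d.getD k 0 + g j)) d
      = d.insert k (d.getD k 0 + (js.map g).sum) := by
  conv_lhs => rw [← pvDict_insert_getD_self d k hnd hc]
  rw [pvDict_foldl_insert_add]

theorem pvDict_outer {κ : Type} [BEq κ] [LawfulBEq κ]
    (js : List Int) (g : Int → Int → Int) :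
    ∀ (ks : List κ) (done : List (κ × Int)) (num : Int) (d : PySem.Dict κ Int),
    d.items = done ++ ks.map (fun k => (k, (0 : Int))) →
    (done.map Prod.fst ++ ks).Nodup →
    ((ks.foldl (fun (s : Int × PySem.Dict κ Int) k =>
        (s.1 + 1, js.foldl (fun d j => d.insert k (d.getD k 0 + g (s.1 + 1) j)) s.2))
      (num, d)).2).items
      = done ++ ks.zipIdx.map (fun p => (p.1, (js.map (g (num + 1 + p.2))).sum)) := by
  intro ks
  induction ks with
  | nil => intro done num d hitems _; simpa using hitems
  | cons k t ih =>
    intro done num d hitems hnd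
    have hkeys : d.keys = done.map Prod.fst ++ k :: t := by
      simp only [PySem.Dict.keys, hitems, List.map_append, List.map_cons, List.map_map]
      simp [Function.comp_def]
    have hknd : d.keys.Nodup := by rw [hkeys]; exact hnd
    have hc : d.contains k = true := by
      rw [PySem.Dict.contains_iff_mem_keys, hkeys]; simp
    have hmem0 : (k, (0 : Int)) ∈ d.items := by rw [hitems]; simp
    have hgetD : d.getD k 0 = 0 := PySem.Dict.getD_of_mem_items d hmem0 hknd 0
    have hknotdone : k ∉ done.map Prod.fst := by
      have := hnd.disjoint
      intro hk; exact (List.disjoint_left.mp this hk) (by simp)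
    have hknott : k ∉ t := by
      have := (List.nodup_append.mp hnd).2.1
      exact (List.nodup_cons.mp this).1
    simp only [List.foldl_cons]
    rw [pvDict_inner js (g (num + 1)) k d hknd hc, hgetD]
    have hit : (d.insert k (0 + (js.map (g (num + 1))).sum)).items
        = (done ++ [(k, 0 + (js.map (g (num + 1))).sum)]) ++ t.map (fun k => (k, (0 : Int))) := by
      rw [PySem.Dict.items_insert_of_contains d _ hc, hitems]
      simp only [List.map_append, List.map_cons]
      have h1 : done.map (fun p => if (p.1 == k) = true then (k, 0 + (js.map (g (num + 1))).sum) else p) = done := by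
        have : ∀ p ∈ done, (if (p.1 == k) = true then (k, 0 + (js.map (g (num + 1))).sum) else p) = p := by
          intro p hp
          have : p.1 ≠ k := by
            intro h; exact hknotdone (by rw [← h]; exact List.mem_map_of_mem hp)
          simp [this]
        rw [List.map_congr_left this]; simp
      have h2 : t.map ((fun p => if (p.1 == k) = true then (k, 0 + (js.map (g (num + 1))).sum) else p) ∘ (fun k => (k, (0 : Int)))) = t.map (fun k => (k, (0 : Int))) := by
        apply List.map_congr_left
        intro x hx
        have : x ≠ k := fun h => hknott (h ▸ hx)
        simp [this]
      simp only [List.map_map] at *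
      rw [h1, h2]
      simp
    have hnd' : ((done ++ [(k, 0 + (js.map (g (num + 1))).sum)]).map Prod.fst ++ t).Nodup := by
      simp only [List.map_append, List.map_cons, List.map_nil]
      have : done.map Prod.fst ++ [k] ++ t = done.map Prod.fst ++ k :: t := by simp
      rw [List.append_assoc]
      simpa using hnd
    rw [ih (done ++ [(k, 0 + (js.map (g (num + 1))).sum)]) (num + 1) _ hit hnd']
    rw [List.zipIdx_cons, List.zipIdx_succ]
    simp only [List.map_cons, List.map_map, List.append_assoc, List.cons_append, List.nil_append]
    congr 2
    · norm_num
    · apply List.map_congr_left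
      intro q _
      simp only [Function.comp_def]
      have hq : (num + 1 + ((q.2 + 1 : Nat) : Int) : Int) = num + 1 + 1 + (q.2 : Int) := by
        push_cast; ring
      rw [hq]

-- ---- common normal form ----
def pvC (m : List (List Int)) : Nat := ((PySem.List.pyGet? m 0).getD []).length

def pvRowS (m : List (List Int)) (i : Int) : Int :=
  ((PySem.List.pyRange 0 ((pvC m : Nat) : Int) 1).map (fun j => pvGet2 m i j)).sum

def pvColS (m : List (List Int)) (j : Int) : Int :=
  ((PySem.List.pyRange 0 (m.length : Int) 1).map (fun i => pvGet2 m i j)).sum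

def pvNormal (m : List (List Int)) : Bool :=
  (!(((List.range m.length).map (fun i : Nat => pvRowS m (i : Int))).any (fun v => v != 1)))
    && (!(((List.range (pvC m)).map (fun j : Nat => pvColS m (j : Int))).any (fun v => v != 1)))

theorem pvZipIdx_range (n : Nat) : (List.range n).zipIdx = (List.range n).map (fun i => (i, i)) := by
  apply List.ext_getElem
  · simp
  · intro i h1 h2
    have hi : i < n := by simpa using h2
    rw [List.getElem_zipIdx]
    simp [List.getElem_range]

-- A-side dict build: items of the key-initialisation loop
theorem pvBuild_items (n : Nat) (p : String) :
    ((PySem.List.pyRange 0 (n : Int) 1).foldl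
        (fun d i => d.insert (p ++ PySem.Int.toStr i) 0) (PySem.Dict.empty : PySem.Dict String Int)).items
      = (List.range n).map (fun i : Nat => (p ++ PySem.Int.toStr (i : Int), (0 : Int))) := by
  rw [PySem.List.pyRange_zero_natCast, List.foldl_map]
  rw [PySem.Dict.items_foldl_insert_fresh (List.range n)
      (fun i : Nat => p ++ PySem.Int.toStr (i : Int)) (fun _ => (0 : Int)) PySem.Dict.empty
      (fun a _ => PySem.Dict.contains_empty _) ?_]
  · rfl
  · apply List.Nodup.map_on ?_ List.nodup_range
    intro x _ y _ hxy
    have := pvKey_inj p (a := (x : Int)) (b := (y : Int)) (by omega) (by omega) hxy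
    omega

theorem pvKeysNodup (n : Nat) (p : String) :
    ((List.range n).map (fun i : Nat => p ++ PySem.Int.toStr (i : Int))).Nodup := by
  apply List.Nodup.map_on ?_ List.nodup_range
  intro x _ y _ hxy
  have := pvKey_inj p (a := (x : Int)) (b := (y : Int)) (by omega) (by omega) hxy
  omega

-- the whole A-side accumulation loop, from the freshly built dict to its values list
theorem pvA_values (n : Nat) (p : String) (js : List Int) (g : Int → Int → Int)
    (d0 : PySem.Dict String Int)
    (hd0 : d0.items = (List.range n).map (fun i : Nat => (p ++ PySem.Int.toStr (i : Int), (0 : Int)))) :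
    ((d0.keys.foldl
        (fun (s : Int × PySem.Dict String Int) k =>
          (s.1 + 1, js.foldl (fun d j => d.insert k (d.getD k 0 + g (s.1 + 1) j)) s.2))
        (-1, d0)).2).values
      = (List.range n).map (fun i : Nat => (js.map (g (i : Int))).sum) := by
  have hkeys : d0.keys = (List.range n).map (fun i : Nat => p ++ PySem.Int.toStr (i : Int)) := by
    simp only [PySem.Dict.keys, hd0, List.map_map]
    rfl
  have hitems : d0.items
      = [] ++ ((List.range n).map (fun i : Nat => p ++ PySem.Int.toStr (i : Int))).map (fun k => (k, (0 : Int))) := by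
    rw [hd0]; simp [List.map_map]
  have hnd : (([] : List (String × Int)).map Prod.fst
      ++ (List.range n).map (fun i : Nat => p ++ PySem.Int.toStr (i : Int))).Nodup := by
    simpa using pvKeysNodup n p
  rw [hkeys, PySem.Dict.values]
  rw [pvDict_outer js g _ [] (-1) d0 hitems hnd]
  rw [List.zipIdx_map, pvZipIdx_range]
  simp only [List.nil_append, List.map_map]
  apply List.map_congr_left
  intro i _
  norm_num

theorem pvIf_chain (a b : Bool) : (if a then false else if b then false else true) = (!a && !b) := by
  cases a <;> cases b <;> rfl

theorem pvAll_eq_not_any (l : List Int) : l.all (fun v => v == 1) = !l.any (fun v => v != 1) := by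
  induction l with
  | nil => rfl
  | cons a t ih => simp [ih, bne]

-- A equals the normal form
theorem pvA_norm (m : List (List Int)) : solo_1 m = pvNormal m := by
  simp only [solo_1]
  rw [pvA_values m.length "variable_fila " _ _ _ (pvBuild_items m.length "variable_fila ")]
  have hcols := pvA_values (((PySem.List.pyGet? m 0).getD []).length) "variable_columna "
      (PySem.List.pyRange 0 (m.length : Int) 1) (fun t j => pvGet2 m j t) _
      (pvBuild_items (((PySem.List.pyGet? m 0).getD []).length) "variable_columna ")
  simp only [] at hcols
  rw [hcols]
  rw [pvIf_chain]
  simp only [pvNormal, pvRowS, pvColS, pvC, List.any_map, Function.comp_def]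

theorem pvRowS_nat (m : List (List Int)) (k : Nat) :
    pvRowS m (k : Int) = ((List.range (pvC m)).map (fun j : Nat => pvGet2 m (k : Int) (j : Int))).sum := by
  unfold pvRowS
  rw [PySem.List.pyRange_zero_natCast, List.map_map]
  rfl

theorem pvColS_nat (m : List (List Int)) (k : Nat) :
    pvColS m (k : Int) = ((List.range m.length).map (fun i : Nat => pvGet2 m (i : Int) (k : Int))).sum := by
  unfold pvColS
  rw [PySem.List.pyRange_zero_natCast, List.map_map]
  rfl

-- ---- B side ----

-- pvGet2 at natural indices is plain getD
theorem pvGet2_nat (m : List (List Int)) (i j : Nat) (hi : i < m.length) :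
    pvGet2 m (i : Int) (j : Int) = (m.getD i []).getD j 0 := by
  unfold pvGet2
  rw [PySem.List.pyGet?_natCast, PySem.List.pyGetD_natCast]
  rw [List.getElem?_eq_getElem hi, List.getD_eq_getElem _ _ hi]
  rfl

-- map over range with getD collapses to map over the list
theorem pvMapRange {α β : Type} (l : List α) (d : α) (g : α → β) :
    (List.range l.length).map (fun i => g (l.getD i d)) = l.map g := by
  apply List.ext_getElem
  · simp
  · intro i h1 h2
    have hi : i < l.length := by simpa using h2
    simp [List.getElem_range, List.getElem?_eq_getElem hi]

-- truncated index-sum = sum of take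
theorem pvTakeSum (r : List Int) : ∀ c : Nat,
    ((List.range c).map (fun j : Nat => r.getD j 0)).sum = (r.take c).sum := by
  induction r with
  | nil =>
    intro c
    simp
  | cons a t ih =>
    intro c
    cases c with
    | zero => simp
    | succ n =>
      rw [List.range_succ_eq_map]
      simp only [List.map_cons, List.map_map, List.take_succ_cons, List.sum_cons]
      have : (List.range n).map ((fun j : Nat => (a :: t).getD j 0) ∘ Nat.succ)
          = (List.range n).map (fun j : Nat => t.getD j 0) := by
        apply List.map_congr_left; intro x _; rfl
      rw [this, ih n]
      rfl

-- the zipWith column fold, characterised entry-wise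
theorem pvZipFold (rows : List (List Int)) : ∀ (cols : List Int),
    (∀ r ∈ rows, cols.length ≤ r.length) →
    rows.foldl (fun cs r => List.zipWith (· + ·) cs r) cols
      = (List.range cols.length).map
          (fun j : Nat => cols.getD j 0 + (rows.map (fun r => r.getD j 0)).sum) := by
  induction rows with
  | nil =>
    intro cols _
    apply List.ext_getElem
    · simp
    · intro i h1 h2
      have hi : i < cols.length := by simpa using h1
      simp [List.getElem_range, List.getElem?_eq_getElem hi]
  | cons r t ih =>
    intro cols h
    have hr : cols.length ≤ r.length := h r (by simp)
    have hlen : (List.zipWith (· + ·) cols r).length = cols.length := by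
      simp [Nat.min_eq_left hr]
    simp only [List.foldl_cons]
    rw [ih _ (by intro x hx; rw [hlen]; exact h x (by simp [hx])), hlen]
    apply List.map_congr_left
    intro j hj
    have hjc : j < cols.length := List.mem_range.mp hj
    have hjr : j < r.length := lt_of_lt_of_le hjc hr
    have : (List.zipWith (· + ·) cols r).getD j 0 = cols.getD j 0 + r.getD j 0 := by
      rw [List.getD_eq_getElem _ _ (by omega), List.getElem_zipWith,
          List.getD_eq_getElem _ _ hjc, List.getD_eq_getElem _ _ hjr]
    rw [this]
    simp [add_assoc]

-- the early-exit recursion equals "all rows ok AND final columns ok"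
theorem pvGoB_eq (c : Nat) : ∀ (rows : List (List Int)) (cols : List Int),
    pvGoB c rows cols
      = (rows.all (fun r => (r.take c).sum == 1)
          && (rows.foldl (fun cs r => List.zipWith (· + ·) cs r) cols).all (fun v => v == 1)) := by
  intro rows
  induction rows with
  | nil => intro cols; simp [pvGoB]
  | cons r t ih =>
    intro cols
    rw [pvGoB, PySem.List.slice_to_natCast]
    by_cases h : (r.take c).sum = 1
    · simp only [h]
      rw [if_neg (by simp)]
      rw [ih]
      simp [h]
    · rw [if_pos (by simp [bne, h])]
      simp [h]

-- B equals the normal form under Pre_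
theorem pvB_norm (m : List (List Int)) (hpre : Pre_solo_1 m) : solo_1_alt m = pvNormal m := by
  obtain ⟨hne, hall⟩ := hpre
  simp only [solo_1_alt]
  rw [show ((PySem.List.pyGet? m 0).getD []).length = pvC m from rfl]
  rw [pvGoB_eq]
  have hrows : (List.range m.length).map (fun i : Nat => pvRowS m (i : Int))
      = m.map (fun r => (r.take (pvC m)).sum) := by
    rw [← pvMapRange m [] (fun r => (r.take (pvC m)).sum)]
    apply List.map_congr_left
    intro i hi
    have hil : i < m.length := List.mem_range.mp hi
    rw [pvRowS_nat]
    have : (List.range (pvC m)).map (fun j : Nat => pvGet2 m (i : Int) (j : Int))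
        = (List.range (pvC m)).map (fun j : Nat => (m.getD i []).getD j 0) := by
      apply List.map_congr_left; intro j _; exact pvGet2_nat m i j hil
    rw [this, pvTakeSum]
  have hzip := pvZipFold m (List.replicate (pvC m) 0)
      (by intro r hr; rw [List.length_replicate]; exact hall r hr)
  rw [List.length_replicate] at hzip
  have hcols : m.foldl (fun cs r => List.zipWith (· + ·) cs r) (List.replicate (pvC m) 0)
      = (List.range (pvC m)).map (fun j : Nat => pvColS m (j : Int)) := by
    rw [hzip]
    apply List.map_congr_left
    intro j _
    rw [pvColS_nat]
    have : (List.range m.length).map (fun i : Nat => pvGet2 m (i : Int) (j : Int))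
        = (List.range m.length).map (fun i : Nat => (m.getD i []).getD j 0) := by
      apply List.map_congr_left; intro i hi; exact pvGet2_nat m i j (List.mem_range.mp hi)
    rw [this, pvMapRange m [] (fun r => r.getD j 0)]
    simp
  rw [hcols]
  unfold pvNormal
  rw [← pvAll_eq_not_any, ← pvAll_eq_not_any, hrows]
  simp only [List.all_map, Function.comp_def]

-- ===== VERDICT (by name: the statements are the Claim_ definitions above) =====
theorem solo_1_spec : Claim_equal_solo_1 := by
  intro m _ hpre
  unfold Spec_solo_1
  rw [pvA_norm, pvB_norm m hpre]
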